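-- pv_equiv track=rewrite | github.com/kishandotpandey1352/multi-agent-fin-doc-intelligent-system | app/retrieval/retriever.py | rewrite_question
-- ===== SOURCE A (Python) =====
-- def rewrite_question(question: str) -> str:
--     text = question.strip()
--     replacements = {
--         "10k": "10-K annual report",
--         "10-k": "10-K annual report",
--         "qoq": "quarter-over-quarter",
--         "yoy": "year-over-year",
--         "md&a": "management discussion and analysis",
--     }
--     lowered = text.lower()
--     for key, value in replacements.items():
--         if key in lowered:
--             lowered = lowered.replace(key, value)
--     return lowered
-- ===== SOURCE B (Python) =====
-- _RULES = [
--     ("10k", "10-K annual report"),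
--     ("10-k", "10-K annual report"),
--     ("qoq", "quarter-over-quarter"),
--     ("yoy", "year-over-year"),
--     ("md&a", "management discussion and analysis"),
-- ]
--
--
-- def rewrite_question(question: str) -> str:
--     lowered = question.strip().lower()
--     out = []
--     i = 0
--     n = len(lowered)
--     while i < n:
--         for key, value in _RULES:
--             if lowered.startswith(key, i):
--                 out.append(value)
--                 i += len(key)
--                 break
--         else:
--             out.append(lowered[i])
--             i += 1
--     return "".join(out)
-- ===== Notes on version B (the rewrite author's own statement) =====
-- stated objective: alternative
-- what changed: Replaces A's five sequential full-string str.replace passes with a single left-to-right scan that at each position tries the five keys in table order and emits the replacement value directly.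
import Mathlib
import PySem

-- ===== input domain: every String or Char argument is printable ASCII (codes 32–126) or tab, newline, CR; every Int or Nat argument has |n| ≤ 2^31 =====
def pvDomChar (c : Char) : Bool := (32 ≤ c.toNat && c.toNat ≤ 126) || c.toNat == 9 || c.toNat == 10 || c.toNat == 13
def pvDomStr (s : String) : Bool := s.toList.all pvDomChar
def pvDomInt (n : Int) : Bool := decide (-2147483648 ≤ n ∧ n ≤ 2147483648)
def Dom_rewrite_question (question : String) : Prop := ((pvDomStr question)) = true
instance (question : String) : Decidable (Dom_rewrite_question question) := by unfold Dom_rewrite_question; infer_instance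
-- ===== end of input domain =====

-- B replaces A's five sequential full-string .replace passes by one left-to-right scan that
-- emits the table value at each match position (objective: alternative single-pass algorithm).

-- ===== PORT A =====
-- A: strip, lower, then for each (key, value) in dict order: if key in lowered, replace all occurrences.
def rewrite_question (question : String) : String :=
  let text := PySem.Str.strip question
  let replacements : List (String × String) :=
    [("10k", "10-K annual report"),
     ("10-k", "10-K annual report"),
     ("qoq", "quarter-over-quarter"),
     ("yoy", "year-over-year"),
     ("md&a", "management discussion and analysis")]
  let lowered := PySem.Str.lower text
  replacements.foldl
    (fun lowered kv =>
      if PySem.Str.isIn kv.1 lowered then PySem.Str.replace lowered kv.1 kv.2 else lowered)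
    lowered

-- ===== PORT B =====
-- B's single left-to-right scan: at each position try the table keys in order;
-- on a match emit the value and jump past the key, else emit the character.
def pvScan : List Char → List Char
  | [] => []
  | c :: t =>
    if List.isPrefixOf ['1', '0', 'k'] (c :: t) then
      "10-K annual report".toList ++ pvScan (t.drop 2)
    else if List.isPrefixOf ['1', '0', '-', 'k'] (c :: t) then
      "10-K annual report".toList ++ pvScan (t.drop 3)
    else if List.isPrefixOf ['q', 'o', 'q'] (c :: t) then
      "quarter-over-quarter".toList ++ pvScan (t.drop 2)
    else if List.isPrefixOf ['y', 'o', 'y'] (c :: t) then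
      "year-over-year".toList ++ pvScan (t.drop 2)
    else if List.isPrefixOf ['m', 'd', '&', 'a'] (c :: t) then
      "management discussion and analysis".toList ++ pvScan (t.drop 3)
    else c :: pvScan t
termination_by l => l.length
decreasing_by all_goals simp [List.length_drop]

def rewrite_question_alt (question : String) : String :=
  let lowered := PySem.Str.lower (PySem.Str.strip question)
  String.ofList (pvScan lowered.toList)

-- ===== PRECONDITION & SPEC =====
def Spec_rewrite_question (question : String) (out : String) : Prop := out = rewrite_question_alt question
instance (question : String) (out : String) : Decidable (Spec_rewrite_question question out) := by unfold Spec_rewrite_question; infer_instance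

-- ===== CLAIM (what is proved, stated in full; the proofs are below) =====
def Claim_equal_rewrite_question : Prop := ∀ (question : String), Dom_rewrite_question question → Spec_rewrite_question question (rewrite_question question)

-- ===== LEMMAS AND PROOFS =====

-- Structural form of Python's str.replace (leftmost, non-overlapping) for a nonempty pattern.
def repC (old new : List Char) : List Char → List Char
  | [] => []
  | c :: t =>
    if List.isPrefixOf old (c :: t) then new ++ repC old new (t.drop (old.length - 1))
    else c :: repC old new t
termination_by l => l.length
decreasing_by all_goals simp [List.length_drop]

-- Scans with only the first 2, 3, 4 table entries (proof-side stages between A's passes and pvScan).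
def pvScan2 : List Char → List Char
  | [] => []
  | c :: t =>
    if List.isPrefixOf ['1', '0', 'k'] (c :: t) then
      "10-K annual report".toList ++ pvScan2 (t.drop 2)
    else if List.isPrefixOf ['1', '0', '-', 'k'] (c :: t) then
      "10-K annual report".toList ++ pvScan2 (t.drop 3)
    else c :: pvScan2 t
termination_by l => l.length
decreasing_by all_goals simp [List.length_drop]

def pvScan3 : List Char → List Char
  | [] => []
  | c :: t =>
    if List.isPrefixOf ['1', '0', 'k'] (c :: t) then
      "10-K annual report".toList ++ pvScan3 (t.drop 2)
    else if List.isPrefixOf ['1', '0', '-', 'k'] (c :: t) then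
      "10-K annual report".toList ++ pvScan3 (t.drop 3)
    else if List.isPrefixOf ['q', 'o', 'q'] (c :: t) then
      "quarter-over-quarter".toList ++ pvScan3 (t.drop 2)
    else c :: pvScan3 t
termination_by l => l.length
decreasing_by all_goals simp [List.length_drop]

def pvScan4 : List Char → List Char
  | [] => []
  | c :: t =>
    if List.isPrefixOf ['1', '0', 'k'] (c :: t) then
      "10-K annual report".toList ++ pvScan4 (t.drop 2)
    else if List.isPrefixOf ['1', '0', '-', 'k'] (c :: t) then
      "10-K annual report".toList ++ pvScan4 (t.drop 3)
    else if List.isPrefixOf ['q', 'o', 'q'] (c :: t) then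
      "quarter-over-quarter".toList ++ pvScan4 (t.drop 2)
    else if List.isPrefixOf ['y', 'o', 'y'] (c :: t) then
      "year-over-year".toList ++ pvScan4 (t.drop 2)
    else c :: pvScan4 t
termination_by l => l.length
decreasing_by all_goals simp [List.length_drop]

theorem pv_not_prefix_append {k v X : List Char} (h1 : ¬ k <+: v) (h2 : ¬ v <+: k) :
    ¬ k <+: (v ++ X) := by
  intro hk
  exact (List.prefix_or_prefix_of_prefix hk (List.prefix_append v X)).elim h1 h2

theorem repC_cons_neg (old nv : List Char) (c : Char) (t : List Char) (h : ¬ old <+: (c :: t)) :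
    repC old nv (c :: t) = c :: repC old nv t := by
  simp only [repC]
  rw [if_neg (by rw [List.isPrefixOf_iff_prefix]; exact h)]

theorem repC_append (k nv vv : List Char)
    (h : ∀ i < vv.length, ¬ (k <+: vv.drop i) ∧ ¬ (vv.drop i <+: k)) (X : List Char) :
    repC k nv (vv ++ X) = vv ++ repC k nv X := by
  induction vv with
  | nil => simp
  | cons c vt ih =>
    have h0 := h 0 (by simp)
    simp only [List.drop_zero] at h0
    show repC k nv (c :: (vt ++ X)) = c :: (vt ++ repC k nv X)
    rw [repC_cons_neg k nv c (vt ++ X) (by exact pv_not_prefix_append h0.1 h0.2)]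
    rw [ih (fun i hi => by simpa using h (i + 1) (by simp; omega))]

theorem repC_reflect (k nv : List Char) (s : List Char)
    (h : ∀ i < s.length, ¬ (s.drop i <+: nv) ∧ ¬ (nv <+: s.drop i)) :
    ∀ t, s <+: repC k nv t → s <+: t := by
  induction s with
  | nil => intro t _; exact List.nil_prefix
  | cons c s' ih =>
    intro t hp
    match t with
    | [] => simp [repC] at hp
    | d :: t' =>
      by_cases hpre : k <+: (d :: t')
      · simp only [repC] at hp
        rw [if_pos (by rw [List.isPrefixOf_iff_prefix]; exact hpre)] at hp
        have h0 := h 0 (by simp)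
        simp only [List.drop_zero] at h0
        exact absurd (List.prefix_or_prefix_of_prefix hp (List.prefix_append nv _))
          (fun h' => h'.elim h0.1 h0.2)
      · rw [repC_cons_neg _ _ _ _ hpre] at hp
        rw [List.cons_prefix_cons] at hp ⊢
        exact ⟨hp.1, ih (fun i hi => by simpa using h (i + 1) (by simp; omega)) t' hp.2⟩

-- A replace pass is the identity when the key does not occur.
theorem repC_of_not_infix (k nv : List Char) :
    ∀ l, ¬ k <:+: l → repC k nv l = l := by
  intro l
  induction l with
  | nil => intro _; simp [repC]
  | cons c t ih =>
    intro hinf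
    have hnp : ¬ k <+: (c :: t) := fun hp => hinf hp.isInfix
    rw [repC_cons_neg _ _ _ _ hnp, ih (fun h' => hinf (List.infix_cons h'))]

-- Bridge: PySem's fuel/accumulator replace equals repC for a nonempty pattern.
theorem pvGo_eq (old nv : List Char) (hold : old ≠ []) :
    ∀ fuel l acc, l.length ≤ fuel →
      PySem.Chars.replace.go old nv fuel l acc = acc.reverse ++ repC old nv l := by
  intro fuel
  induction fuel with
  | zero =>
    intro l acc hl
    have : l = [] := List.eq_nil_of_length_eq_zero (by omega)
    subst this
    simp only [PySem.Chars.replace.go]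
    simp [repC]
  | succ fuel ih =>
    intro l acc hl
    match l with
    | [] => simp [PySem.Chars.replace.go, repC]
    | c :: t =>
      simp only [PySem.Chars.replace.go]
      have hlen : 1 ≤ old.length := by
        cases old with
        | nil => exact absurd rfl hold
        | cons _ _ => simp
      by_cases hpre : List.isPrefixOf old (c :: t) = true
      · rw [if_pos hpre]
        have hdrop : (c :: t).drop old.length = t.drop (old.length - 1) := by
          cases old with
          | nil => exact absurd rfl hold
          | cons _ _ => simp
        rw [ih _ _ (by simp at hl ⊢; omega)]
        simp only [repC]
        rw [if_pos hpre, hdrop]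
        simp
      · rw [if_neg hpre]
        rw [ih _ _ (by simp at hl ⊢; omega)]
        simp only [repC]
        rw [if_neg hpre]
        simp

theorem replace_eq_repC (s old nv : List Char) (hold : old ≠ []) :
    PySem.Chars.replace s old nv = repC old nv s := by
  rw [PySem.Chars.replace]
  rw [if_neg (by simpa [List.isEmpty_iff] using hold)]
  simpa using pvGo_eq old nv hold s.length s [] le_rfl

-- One pass of A's loop body, on the list side.
theorem pvStep_eq (s k v : String) (hk : k.toList ≠ []) :
    (if PySem.Str.isIn k s = true then PySem.Str.replace s k v else s).toList
      = repC k.toList v.toList s.toList := by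
  by_cases h : PySem.Str.isIn k s = true
  · rw [if_pos h, PySem.Str.toList_replace, replace_eq_repC _ _ _ hk]
  · rw [if_neg h]
    have hinf : ¬ k.toList <:+: s.toList := by
      rw [← PySem.Str.isIn_iff_infix]
      exact h
    exact (repC_of_not_infix _ _ _ hinf).symm

-- cons-step, append and prefix-reflection lemmas for the staged scans.
theorem pvScan2_cons_neg (c : Char) (t : List Char)
    (h1 : ¬ ['1','0','k'] <+: (c :: t)) (h2 : ¬ ['1','0','-','k'] <+: (c :: t)) :
    pvScan2 (c :: t) = c :: pvScan2 t := by
  simp only [pvScan2]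
  rw [if_neg (by rw [List.isPrefixOf_iff_prefix]; exact h1),
      if_neg (by rw [List.isPrefixOf_iff_prefix]; exact h2)]

theorem pvScan3_cons_neg (c : Char) (t : List Char)
    (h1 : ¬ ['1','0','k'] <+: (c :: t)) (h2 : ¬ ['1','0','-','k'] <+: (c :: t))
    (h3 : ¬ ['q','o','q'] <+: (c :: t)) :
    pvScan3 (c :: t) = c :: pvScan3 t := by
  simp only [pvScan3]
  rw [if_neg (by rw [List.isPrefixOf_iff_prefix]; exact h1),
      if_neg (by rw [List.isPrefixOf_iff_prefix]; exact h2),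
      if_neg (by rw [List.isPrefixOf_iff_prefix]; exact h3)]

theorem pvScan4_cons_neg (c : Char) (t : List Char)
    (h1 : ¬ ['1','0','k'] <+: (c :: t)) (h2 : ¬ ['1','0','-','k'] <+: (c :: t))
    (h3 : ¬ ['q','o','q'] <+: (c :: t)) (h4 : ¬ ['y','o','y'] <+: (c :: t)) :
    pvScan4 (c :: t) = c :: pvScan4 t := by
  simp only [pvScan4]
  rw [if_neg (by rw [List.isPrefixOf_iff_prefix]; exact h1),
      if_neg (by rw [List.isPrefixOf_iff_prefix]; exact h2),
      if_neg (by rw [List.isPrefixOf_iff_prefix]; exact h3),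
      if_neg (by rw [List.isPrefixOf_iff_prefix]; exact h4)]

theorem pvScan_cons_neg (c : Char) (t : List Char)
    (h1 : ¬ ['1','0','k'] <+: (c :: t)) (h2 : ¬ ['1','0','-','k'] <+: (c :: t))
    (h3 : ¬ ['q','o','q'] <+: (c :: t)) (h4 : ¬ ['y','o','y'] <+: (c :: t))
    (h5 : ¬ ['m','d','&','a'] <+: (c :: t)) :
    pvScan (c :: t) = c :: pvScan t := by
  simp only [pvScan]
  rw [if_neg (by rw [List.isPrefixOf_iff_prefix]; exact h1),
      if_neg (by rw [List.isPrefixOf_iff_prefix]; exact h2),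
      if_neg (by rw [List.isPrefixOf_iff_prefix]; exact h3),
      if_neg (by rw [List.isPrefixOf_iff_prefix]; exact h4),
      if_neg (by rw [List.isPrefixOf_iff_prefix]; exact h5)]

theorem pvScan2_append (vv : List Char)
    (h1 : ∀ i < vv.length, ¬ (['1','0','k'] <+: vv.drop i) ∧ ¬ (vv.drop i <+: ['1','0','k']))
    (h2 : ∀ i < vv.length, ¬ (['1','0','-','k'] <+: vv.drop i) ∧ ¬ (vv.drop i <+: ['1','0','-','k']))
    (X : List Char) :
    pvScan2 (vv ++ X) = vv ++ pvScan2 X := by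
  induction vv with
  | nil => simp
  | cons c vt ih =>
    have h10 := h1 0 (by simp)
    have h20 := h2 0 (by simp)
    simp only [List.drop_zero] at h10 h20
    show pvScan2 (c :: (vt ++ X)) = c :: (vt ++ pvScan2 X)
    rw [pvScan2_cons_neg c (vt ++ X) (by exact pv_not_prefix_append h10.1 h10.2)
        (by exact pv_not_prefix_append h20.1 h20.2)]
    rw [ih (fun i hi => by simpa using h1 (i + 1) (by simp; omega))
        (fun i hi => by simpa using h2 (i + 1) (by simp; omega))]

theorem pvScan3_append (vv : List Char)
    (h1 : ∀ i < vv.length, ¬ (['1','0','k'] <+: vv.drop i) ∧ ¬ (vv.drop i <+: ['1','0','k']))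
    (h2 : ∀ i < vv.length, ¬ (['1','0','-','k'] <+: vv.drop i) ∧ ¬ (vv.drop i <+: ['1','0','-','k']))
    (h3 : ∀ i < vv.length, ¬ (['q','o','q'] <+: vv.drop i) ∧ ¬ (vv.drop i <+: ['q','o','q']))
    (X : List Char) :
    pvScan3 (vv ++ X) = vv ++ pvScan3 X := by
  induction vv with
  | nil => simp
  | cons c vt ih =>
    have h10 := h1 0 (by simp)
    have h20 := h2 0 (by simp)
    have h30 := h3 0 (by simp)
    simp only [List.drop_zero] at h10 h20 h30
    show pvScan3 (c :: (vt ++ X)) = c :: (vt ++ pvScan3 X)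
    rw [pvScan3_cons_neg c (vt ++ X) (by exact pv_not_prefix_append h10.1 h10.2)
        (by exact pv_not_prefix_append h20.1 h20.2) (by exact pv_not_prefix_append h30.1 h30.2)]
    rw [ih (fun i hi => by simpa using h1 (i + 1) (by simp; omega))
        (fun i hi => by simpa using h2 (i + 1) (by simp; omega))
        (fun i hi => by simpa using h3 (i + 1) (by simp; omega))]

theorem pvScan4_append (vv : List Char)
    (h1 : ∀ i < vv.length, ¬ (['1','0','k'] <+: vv.drop i) ∧ ¬ (vv.drop i <+: ['1','0','k']))
    (h2 : ∀ i < vv.length, ¬ (['1','0','-','k'] <+: vv.drop i) ∧ ¬ (vv.drop i <+: ['1','0','-','k']))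
    (h3 : ∀ i < vv.length, ¬ (['q','o','q'] <+: vv.drop i) ∧ ¬ (vv.drop i <+: ['q','o','q']))
    (h4 : ∀ i < vv.length, ¬ (['y','o','y'] <+: vv.drop i) ∧ ¬ (vv.drop i <+: ['y','o','y']))
    (X : List Char) :
    pvScan4 (vv ++ X) = vv ++ pvScan4 X := by
  induction vv with
  | nil => simp
  | cons c vt ih =>
    have h10 := h1 0 (by simp)
    have h20 := h2 0 (by simp)
    have h30 := h3 0 (by simp)
    have h40 := h4 0 (by simp)
    simp only [List.drop_zero] at h10 h20 h30 h40
    show pvScan4 (c :: (vt ++ X)) = c :: (vt ++ pvScan4 X)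
    rw [pvScan4_cons_neg c (vt ++ X) (by exact pv_not_prefix_append h10.1 h10.2)
        (by exact pv_not_prefix_append h20.1 h20.2) (by exact pv_not_prefix_append h30.1 h30.2)
        (by exact pv_not_prefix_append h40.1 h40.2)]
    rw [ih (fun i hi => by simpa using h1 (i + 1) (by simp; omega))
        (fun i hi => by simpa using h2 (i + 1) (by simp; omega))
        (fun i hi => by simpa using h3 (i + 1) (by simp; omega))
        (fun i hi => by simpa using h4 (i + 1) (by simp; omega))]

theorem pvScan2_reflect (s : List Char)
    (hA : ∀ i < s.length, ¬ (s.drop i <+: "10-K annual report".toList)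
            ∧ ¬ ("10-K annual report".toList <+: s.drop i)) :
    ∀ t, s <+: pvScan2 t → s <+: t := by
  induction s with
  | nil => intro t _; exact List.nil_prefix
  | cons c s' ih =>
    intro t hp
    match t with
    | [] => simp [pvScan2] at hp
    | d :: t' =>
      have h0 := hA 0 (by simp)
      simp only [List.drop_zero] at h0
      by_cases hk1 : ['1','0','k'] <+: (d :: t')
      · simp only [pvScan2] at hp
        rw [if_pos (by rw [List.isPrefixOf_iff_prefix]; exact hk1)] at hp
        exact absurd (List.prefix_or_prefix_of_prefix hp (List.prefix_append _ _))
          (fun h' => h'.elim h0.1 h0.2)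
      · by_cases hk2 : ['1','0','-','k'] <+: (d :: t')
        · simp only [pvScan2] at hp
          rw [if_neg (by rw [List.isPrefixOf_iff_prefix]; exact hk1),
              if_pos (by rw [List.isPrefixOf_iff_prefix]; exact hk2)] at hp
          exact absurd (List.prefix_or_prefix_of_prefix hp (List.prefix_append _ _))
            (fun h' => h'.elim h0.1 h0.2)
        · rw [pvScan2_cons_neg _ _ hk1 hk2] at hp
          rw [List.cons_prefix_cons] at hp ⊢
          exact ⟨hp.1, ih (fun i hi => by simpa using hA (i + 1) (by simp; omega)) t' hp.2⟩

theorem pvScan3_reflect (s : List Char)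
    (hA : ∀ i < s.length, ¬ (s.drop i <+: "10-K annual report".toList)
            ∧ ¬ ("10-K annual report".toList <+: s.drop i))
    (hB : ∀ i < s.length, ¬ (s.drop i <+: "quarter-over-quarter".toList)
            ∧ ¬ ("quarter-over-quarter".toList <+: s.drop i)) :
    ∀ t, s <+: pvScan3 t → s <+: t := by
  induction s with
  | nil => intro t _; exact List.nil_prefix
  | cons c s' ih =>
    intro t hp
    match t with
    | [] => simp [pvScan3] at hp
    | d :: t' =>
      have hA0 := hA 0 (by simp)
      have hB0 := hB 0 (by simp)
      simp only [List.drop_zero] at hA0 hB0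
      by_cases hk1 : ['1','0','k'] <+: (d :: t')
      · simp only [pvScan3] at hp
        rw [if_pos (by rw [List.isPrefixOf_iff_prefix]; exact hk1)] at hp
        exact absurd (List.prefix_or_prefix_of_prefix hp (List.prefix_append _ _))
          (fun h' => h'.elim hA0.1 hA0.2)
      · by_cases hk2 : ['1','0','-','k'] <+: (d :: t')
        · simp only [pvScan3] at hp
          rw [if_neg (by rw [List.isPrefixOf_iff_prefix]; exact hk1),
              if_pos (by rw [List.isPrefixOf_iff_prefix]; exact hk2)] at hp
          exact absurd (List.prefix_or_prefix_of_prefix hp (List.prefix_append _ _))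
            (fun h' => h'.elim hA0.1 hA0.2)
        · by_cases hk3 : ['q','o','q'] <+: (d :: t')
          · simp only [pvScan3] at hp
            rw [if_neg (by rw [List.isPrefixOf_iff_prefix]; exact hk1),
                if_neg (by rw [List.isPrefixOf_iff_prefix]; exact hk2),
                if_pos (by rw [List.isPrefixOf_iff_prefix]; exact hk3)] at hp
            exact absurd (List.prefix_or_prefix_of_prefix hp (List.prefix_append _ _))
              (fun h' => h'.elim hB0.1 hB0.2)
          · rw [pvScan3_cons_neg _ _ hk1 hk2 hk3] at hp
            rw [List.cons_prefix_cons] at hp ⊢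
            exact ⟨hp.1, ih (fun i hi => by simpa using hA (i + 1) (by simp; omega))
              (fun i hi => by simpa using hB (i + 1) (by simp; omega)) t' hp.2⟩

theorem pvScan4_reflect (s : List Char)
    (hA : ∀ i < s.length, ¬ (s.drop i <+: "10-K annual report".toList)
            ∧ ¬ ("10-K annual report".toList <+: s.drop i))
    (hB : ∀ i < s.length, ¬ (s.drop i <+: "quarter-over-quarter".toList)
            ∧ ¬ ("quarter-over-quarter".toList <+: s.drop i))
    (hC : ∀ i < s.length, ¬ (s.drop i <+: "year-over-year".toList)
            ∧ ¬ ("year-over-year".toList <+: s.drop i)) :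
    ∀ t, s <+: pvScan4 t → s <+: t := by
  induction s with
  | nil => intro t _; exact List.nil_prefix
  | cons c s' ih =>
    intro t hp
    match t with
    | [] => simp [pvScan4] at hp
    | d :: t' =>
      have hA0 := hA 0 (by simp)
      have hB0 := hB 0 (by simp)
      have hC0 := hC 0 (by simp)
      simp only [List.drop_zero] at hA0 hB0 hC0
      by_cases hk1 : ['1','0','k'] <+: (d :: t')
      · simp only [pvScan4] at hp
        rw [if_pos (by rw [List.isPrefixOf_iff_prefix]; exact hk1)] at hp
        exact absurd (List.prefix_or_prefix_of_prefix hp (List.prefix_append _ _))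
          (fun h' => h'.elim hA0.1 hA0.2)
      · by_cases hk2 : ['1','0','-','k'] <+: (d :: t')
        · simp only [pvScan4] at hp
          rw [if_neg (by rw [List.isPrefixOf_iff_prefix]; exact hk1),
              if_pos (by rw [List.isPrefixOf_iff_prefix]; exact hk2)] at hp
          exact absurd (List.prefix_or_prefix_of_prefix hp (List.prefix_append _ _))
            (fun h' => h'.elim hA0.1 hA0.2)
        · by_cases hk3 : ['q','o','q'] <+: (d :: t')
          · simp only [pvScan4] at hp
            rw [if_neg (by rw [List.isPrefixOf_iff_prefix]; exact hk1),
                if_neg (by rw [List.isPrefixOf_iff_prefix]; exact hk2),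
                if_pos (by rw [List.isPrefixOf_iff_prefix]; exact hk3)] at hp
            exact absurd (List.prefix_or_prefix_of_prefix hp (List.prefix_append _ _))
              (fun h' => h'.elim hB0.1 hB0.2)
          · by_cases hk4 : ['y','o','y'] <+: (d :: t')
            · simp only [pvScan4] at hp
              rw [if_neg (by rw [List.isPrefixOf_iff_prefix]; exact hk1),
                  if_neg (by rw [List.isPrefixOf_iff_prefix]; exact hk2),
                  if_neg (by rw [List.isPrefixOf_iff_prefix]; exact hk3),
                  if_pos (by rw [List.isPrefixOf_iff_prefix]; exact hk4)] at hp
              exact absurd (List.prefix_or_prefix_of_prefix hp (List.prefix_append _ _))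
                (fun h' => h'.elim hC0.1 hC0.2)
            · rw [pvScan4_cons_neg _ _ hk1 hk2 hk3 hk4] at hp
              rw [List.cons_prefix_cons] at hp ⊢
              exact ⟨hp.1, ih (fun i hi => by simpa using hA (i + 1) (by simp; omega))
                (fun i hi => by simpa using hB (i + 1) (by simp; omega))
                (fun i hi => by simpa using hC (i + 1) (by simp; omega)) t' hp.2⟩

-- ===== stage lemmas: pass j over the (j-1)-key scan equals the j-key scan =====

theorem pvS2 (l : List Char) :
    repC ['1','0','-','k'] "10-K annual report".toList
      (repC ['1','0','k'] "10-K annual report".toList l) = pvScan2 l := by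
  match l with
  | [] => simp [repC, pvScan2]
  | c :: t =>
    by_cases hp1 : ['1','0','k'] <+: (c :: t)
    · obtain ⟨rest, hr⟩ := hp1
      have hlt : rest.length < (c :: t).length := by rw [← hr]; simp; omega
      rw [← hr]
      have e1 : repC ['1','0','k'] "10-K annual report".toList (['1','0','k'] ++ rest)
          = "10-K annual report".toList ++ repC ['1','0','k'] "10-K annual report".toList rest := by
        simp [repC, List.isPrefixOf]
      have e3 : pvScan2 (['1','0','k'] ++ rest)
          = "10-K annual report".toList ++ pvScan2 rest := by
        simp [pvScan2, List.isPrefixOf]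
      rw [e1, repC_append _ _ _ (by decide), pvS2 rest, e3]
    · by_cases hp2 : ['1','0','-','k'] <+: (c :: t)
      · obtain ⟨rest, hr⟩ := hp2
        have hlt : rest.length < (c :: t).length := by rw [← hr]; simp; omega
        rw [← hr]
        have e1 : repC ['1','0','k'] "10-K annual report".toList (['1','0','-','k'] ++ rest)
            = '1'::'0'::'-'::'k':: repC ['1','0','k'] "10-K annual report".toList rest := by
          simp [repC, List.isPrefixOf]
        have e2 : repC ['1','0','-','k'] "10-K annual report".toList
            ('1'::'0'::'-'::'k':: repC ['1','0','k'] "10-K annual report".toList rest)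
            = "10-K annual report".toList
              ++ repC ['1','0','-','k'] "10-K annual report".toList
                  (repC ['1','0','k'] "10-K annual report".toList rest) := by
          simp [repC, List.isPrefixOf]
        have e3 : pvScan2 (['1','0','-','k'] ++ rest)
            = "10-K annual report".toList ++ pvScan2 rest := by
          simp [pvScan2, List.isPrefixOf]
        rw [e1, e2, pvS2 rest, e3]
      · have e1 : repC ['1','0','k'] "10-K annual report".toList (c :: t)
            = c :: repC ['1','0','k'] "10-K annual report".toList t :=
          repC_cons_neg _ _ _ _ hp1
        rw [e1]
        have hnp : ¬ (['1','0','-','k'] <+: (c :: repC ['1','0','k'] "10-K annual report".toList t)) := by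
          intro hk
          rcases (List.cons_prefix_cons).1 hk with ⟨rfl, htail⟩
          exact hp2 (List.cons_prefix_cons.2 ⟨rfl, repC_reflect _ _ _ (by decide) _ htail⟩)
        rw [repC_cons_neg _ _ _ _ hnp, pvS2 t, pvScan2_cons_neg _ _ hp1 hp2]
termination_by l.length
decreasing_by all_goals simp_all

theorem pvS3 (l : List Char) :
    repC ['q','o','q'] "quarter-over-quarter".toList (pvScan2 l) = pvScan3 l := by
  match l with
  | [] => simp [repC, pvScan2, pvScan3]
  | c :: t =>
    by_cases hp1 : ['1','0','k'] <+: (c :: t)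
    · obtain ⟨rest, hr⟩ := hp1
      have hlt : rest.length < (c :: t).length := by rw [← hr]; simp; omega
      rw [← hr]
      have e1 : pvScan2 (['1','0','k'] ++ rest)
          = "10-K annual report".toList ++ pvScan2 rest := by
        simp [pvScan2, List.isPrefixOf]
      have e3 : pvScan3 (['1','0','k'] ++ rest)
          = "10-K annual report".toList ++ pvScan3 rest := by
        simp [pvScan3, List.isPrefixOf]
      rw [e1, repC_append _ _ _ (by decide), pvS3 rest, e3]
    · by_cases hp2 : ['1','0','-','k'] <+: (c :: t)
      · obtain ⟨rest, hr⟩ := hp2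
        have hlt : rest.length < (c :: t).length := by rw [← hr]; simp; omega
        rw [← hr]
        have e1 : pvScan2 (['1','0','-','k'] ++ rest)
            = "10-K annual report".toList ++ pvScan2 rest := by
          simp [pvScan2, List.isPrefixOf]
        have e3 : pvScan3 (['1','0','-','k'] ++ rest)
            = "10-K annual report".toList ++ pvScan3 rest := by
          simp [pvScan3, List.isPrefixOf]
        rw [e1, repC_append _ _ _ (by decide), pvS3 rest, e3]
      · by_cases hp3 : ['q','o','q'] <+: (c :: t)
        · obtain ⟨rest, hr⟩ := hp3
          have hlt : rest.length < (c :: t).length := by rw [← hr]; simp; omega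
          rw [← hr]
          have e1 : pvScan2 (['q','o','q'] ++ rest) = ['q','o','q'] ++ pvScan2 rest :=
            pvScan2_append _ (by decide) (by decide) rest
          have e2 : repC ['q','o','q'] "quarter-over-quarter".toList (['q','o','q'] ++ pvScan2 rest)
              = "quarter-over-quarter".toList
                ++ repC ['q','o','q'] "quarter-over-quarter".toList (pvScan2 rest) := by
            simp [repC, List.isPrefixOf]
          have e3 : pvScan3 (['q','o','q'] ++ rest)
              = "quarter-over-quarter".toList ++ pvScan3 rest := by
            simp [pvScan3, List.isPrefixOf]
          rw [e1, e2, pvS3 rest, e3]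
        · rw [pvScan2_cons_neg _ _ hp1 hp2]
          have hnp : ¬ (['q','o','q'] <+: (c :: pvScan2 t)) := by
            intro hk
            rcases (List.cons_prefix_cons).1 hk with ⟨rfl, htail⟩
            exact hp3 (List.cons_prefix_cons.2 ⟨rfl, pvScan2_reflect _ (by decide) _ htail⟩)
          rw [repC_cons_neg _ _ _ _ hnp, pvS3 t, pvScan3_cons_neg _ _ hp1 hp2 hp3]
termination_by l.length
decreasing_by all_goals simp_all

theorem pvS4 (l : List Char) :
    repC ['y','o','y'] "year-over-year".toList (pvScan3 l) = pvScan4 l := by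
  match l with
  | [] => simp [repC, pvScan3, pvScan4]
  | c :: t =>
    by_cases hp1 : ['1','0','k'] <+: (c :: t)
    · obtain ⟨rest, hr⟩ := hp1
      have hlt : rest.length < (c :: t).length := by rw [← hr]; simp; omega
      rw [← hr]
      have e1 : pvScan3 (['1','0','k'] ++ rest)
          = "10-K annual report".toList ++ pvScan3 rest := by
        simp [pvScan3, List.isPrefixOf]
      have e3 : pvScan4 (['1','0','k'] ++ rest)
          = "10-K annual report".toList ++ pvScan4 rest := by
        simp [pvScan4, List.isPrefixOf]
      rw [e1, repC_append _ _ _ (by decide), pvS4 rest, e3]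
    · by_cases hp2 : ['1','0','-','k'] <+: (c :: t)
      · obtain ⟨rest, hr⟩ := hp2
        have hlt : rest.length < (c :: t).length := by rw [← hr]; simp; omega
        rw [← hr]
        have e1 : pvScan3 (['1','0','-','k'] ++ rest)
            = "10-K annual report".toList ++ pvScan3 rest := by
          simp [pvScan3, List.isPrefixOf]
        have e3 : pvScan4 (['1','0','-','k'] ++ rest)
            = "10-K annual report".toList ++ pvScan4 rest := by
          simp [pvScan4, List.isPrefixOf]
        rw [e1, repC_append _ _ _ (by decide), pvS4 rest, e3]
      · by_cases hp3 : ['q','o','q'] <+: (c :: t)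
        · obtain ⟨rest, hr⟩ := hp3
          have hlt : rest.length < (c :: t).length := by rw [← hr]; simp; omega
          rw [← hr]
          have e1 : pvScan3 (['q','o','q'] ++ rest)
              = "quarter-over-quarter".toList ++ pvScan3 rest := by
            simp [pvScan3, List.isPrefixOf]
          have e3 : pvScan4 (['q','o','q'] ++ rest)
              = "quarter-over-quarter".toList ++ pvScan4 rest := by
            simp [pvScan4, List.isPrefixOf]
          rw [e1, repC_append _ _ _ (by decide), pvS4 rest, e3]
        · by_cases hp4 : ['y','o','y'] <+: (c :: t)
          · obtain ⟨rest, hr⟩ := hp4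
            have hlt : rest.length < (c :: t).length := by rw [← hr]; simp; omega
            rw [← hr]
            have e1 : pvScan3 (['y','o','y'] ++ rest) = ['y','o','y'] ++ pvScan3 rest :=
              pvScan3_append _ (by decide) (by decide) (by decide) rest
            have e2 : repC ['y','o','y'] "year-over-year".toList (['y','o','y'] ++ pvScan3 rest)
                = "year-over-year".toList
                  ++ repC ['y','o','y'] "year-over-year".toList (pvScan3 rest) := by
              simp [repC, List.isPrefixOf]
            have e3 : pvScan4 (['y','o','y'] ++ rest)
                = "year-over-year".toList ++ pvScan4 rest := by
              simp [pvScan4, List.isPrefixOf]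
            rw [e1, e2, pvS4 rest, e3]
          · rw [pvScan3_cons_neg _ _ hp1 hp2 hp3]
            have hnp : ¬ (['y','o','y'] <+: (c :: pvScan3 t)) := by
              intro hk
              rcases (List.cons_prefix_cons).1 hk with ⟨rfl, htail⟩
              exact hp4 (List.cons_prefix_cons.2
                ⟨rfl, pvScan3_reflect _ (by decide) (by decide) _ htail⟩)
            rw [repC_cons_neg _ _ _ _ hnp, pvS4 t, pvScan4_cons_neg _ _ hp1 hp2 hp3 hp4]
termination_by l.length
decreasing_by all_goals simp_all

theorem pvS5 (l : List Char) :
    repC ['m','d','&','a'] "management discussion and analysis".toList (pvScan4 l) = pvScan l := by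
  match l with
  | [] => simp [repC, pvScan4, pvScan]
  | c :: t =>
    by_cases hp1 : ['1','0','k'] <+: (c :: t)
    · obtain ⟨rest, hr⟩ := hp1
      have hlt : rest.length < (c :: t).length := by rw [← hr]; simp; omega
      rw [← hr]
      have e1 : pvScan4 (['1','0','k'] ++ rest)
          = "10-K annual report".toList ++ pvScan4 rest := by
        simp [pvScan4, List.isPrefixOf]
      have e3 : pvScan (['1','0','k'] ++ rest)
          = "10-K annual report".toList ++ pvScan rest := by
        simp [pvScan, List.isPrefixOf]
      rw [e1, repC_append _ _ _ (by decide), pvS5 rest, e3]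
    · by_cases hp2 : ['1','0','-','k'] <+: (c :: t)
      · obtain ⟨rest, hr⟩ := hp2
        have hlt : rest.length < (c :: t).length := by rw [← hr]; simp; omega
        rw [← hr]
        have e1 : pvScan4 (['1','0','-','k'] ++ rest)
            = "10-K annual report".toList ++ pvScan4 rest := by
          simp [pvScan4, List.isPrefixOf]
        have e3 : pvScan (['1','0','-','k'] ++ rest)
            = "10-K annual report".toList ++ pvScan rest := by
          simp [pvScan, List.isPrefixOf]
        rw [e1, repC_append _ _ _ (by decide), pvS5 rest, e3]
      · by_cases hp3 : ['q','o','q'] <+: (c :: t)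
        · obtain ⟨rest, hr⟩ := hp3
          have hlt : rest.length < (c :: t).length := by rw [← hr]; simp; omega
          rw [← hr]
          have e1 : pvScan4 (['q','o','q'] ++ rest)
              = "quarter-over-quarter".toList ++ pvScan4 rest := by
            simp [pvScan4, List.isPrefixOf]
          have e3 : pvScan (['q','o','q'] ++ rest)
              = "quarter-over-quarter".toList ++ pvScan rest := by
            simp [pvScan, List.isPrefixOf]
          rw [e1, repC_append _ _ _ (by decide), pvS5 rest, e3]
        · by_cases hp4 : ['y','o','y'] <+: (c :: t)
          · obtain ⟨rest, hr⟩ := hp4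
            have hlt : rest.length < (c :: t).length := by rw [← hr]; simp; omega
            rw [← hr]
            have e1 : pvScan4 (['y','o','y'] ++ rest)
                = "year-over-year".toList ++ pvScan4 rest := by
              simp [pvScan4, List.isPrefixOf]
            have e3 : pvScan (['y','o','y'] ++ rest)
                = "year-over-year".toList ++ pvScan rest := by
              simp [pvScan, List.isPrefixOf]
            rw [e1, repC_append _ _ _ (by decide), pvS5 rest, e3]
          · by_cases hp5 : ['m','d','&','a'] <+: (c :: t)
            · obtain ⟨rest, hr⟩ := hp5
              have hlt : rest.length < (c :: t).length := by rw [← hr]; simp; omega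
              rw [← hr]
              have e1 : pvScan4 (['m','d','&','a'] ++ rest) = ['m','d','&','a'] ++ pvScan4 rest :=
                pvScan4_append _ (by decide) (by decide) (by decide) (by decide) rest
              have e2 : repC ['m','d','&','a'] "management discussion and analysis".toList
                  (['m','d','&','a'] ++ pvScan4 rest)
                  = "management discussion and analysis".toList
                    ++ repC ['m','d','&','a'] "management discussion and analysis".toList
                        (pvScan4 rest) := by
                simp [repC, List.isPrefixOf]
              have e3 : pvScan (['m','d','&','a'] ++ rest)
                  = "management discussion and analysis".toList ++ pvScan rest := by
                simp [pvScan, List.isPrefixOf]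
              rw [e1, e2, pvS5 rest, e3]
            · rw [pvScan4_cons_neg _ _ hp1 hp2 hp3 hp4]
              have hnp : ¬ (['m','d','&','a'] <+: (c :: pvScan4 t)) := by
                intro hk
                rcases (List.cons_prefix_cons).1 hk with ⟨rfl, htail⟩
                exact hp5 (List.cons_prefix_cons.2
                  ⟨rfl, pvScan4_reflect _ (by decide) (by decide) (by decide) _ htail⟩)
              rw [repC_cons_neg _ _ _ _ hnp, pvS5 t, pvScan_cons_neg _ _ hp1 hp2 hp3 hp4 hp5]
termination_by l.length
decreasing_by all_goals simp_all

-- ===== VERDICT (by name: the statement is the Claim_ definition above) =====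
theorem rewrite_question_spec : Claim_equal_rewrite_question := by
  intro question _
  unfold Spec_rewrite_question rewrite_question rewrite_question_alt
  rw [← String.toList_inj]
  simp only [List.foldl]
  rw [pvStep_eq _ _ _ (by decide), pvStep_eq _ _ _ (by decide), pvStep_eq _ _ _ (by decide),
      pvStep_eq _ _ _ (by decide), pvStep_eq _ _ _ (by decide)]
  rw [show "10k".toList = ['1','0','k'] from rfl, show "10-k".toList = ['1','0','-','k'] from rfl,
      show "qoq".toList = ['q','o','q'] from rfl, show "yoy".toList = ['y','o','y'] from rfl,
      show "md&a".toList = ['m','d','&','a'] from rfl]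
  rw [pvS2, pvS3, pvS4, pvS5, String.toList_ofList]
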